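-- pv_equiv track=rewrite | github.com/Akash9798/intutor-assignment | program2.py | solution
-- ===== SOURCE A (Python) =====
-- def solution(arr):
--     """Return max len of non zero sub array"""
--
--     d = {} # stores index of element's last occurence
--
--     for index,val in enumerate(arr):
--
--         d[val]=index
--
--
--     max_len = 0
--     for index,val in enumerate(arr):
--
--         max_len = max(max_len,d[val]-index) #neg no ignored from front to make it zero.
--
--
--     return max_len
-- ===== SOURCE B (Python) =====
-- def solution(arr):
--     """Return max len of non zero sub array"""
--     first = {}  # earliest index of each value
--     max_len = 0
--     for i, val in enumerate(arr):
--         if val in first: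
--             max_len = max(max_len, i - first[val])
--         else:
--             first[val] = i
--     return max_len
-- ===== Notes on version B (the rewrite author's own statement) =====
-- stated objective: faster
-- what changed: B replaces A's two passes (build a last-occurrence dict, then rescan computing last[val]-index) by one pass that maintains a first-occurrence dict and folds the maximum of i - first[val] into the same loop.
import Mathlib
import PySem

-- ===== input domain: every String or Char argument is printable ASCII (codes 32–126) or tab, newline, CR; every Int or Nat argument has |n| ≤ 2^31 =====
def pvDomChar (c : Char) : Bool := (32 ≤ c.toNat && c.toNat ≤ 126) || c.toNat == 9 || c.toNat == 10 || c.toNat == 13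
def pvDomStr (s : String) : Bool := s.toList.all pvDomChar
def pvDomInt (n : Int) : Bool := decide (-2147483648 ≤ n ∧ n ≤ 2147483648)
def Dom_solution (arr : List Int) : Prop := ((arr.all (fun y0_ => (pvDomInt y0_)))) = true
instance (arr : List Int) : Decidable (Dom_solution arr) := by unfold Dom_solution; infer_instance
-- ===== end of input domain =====

-- B replaces A's two passes (build a last-occurrence dict, then rescan taking max of last[val]-index)
-- by one pass maintaining a first-occurrence dict and folding max of i - first[val] into the loop (alternative decomposition).

-- ===== PORT A =====
-- d[val] is ported as getD _ 0: every key looked up was inserted by the first loop, so Python never raises KeyError here.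
def solution (arr : List Int) : Int :=
  let d : PySem.Dict Int Int :=
    (PySem.List.enumerate arr 0).foldl (fun d p => d.insert p.2 p.1) PySem.Dict.empty
  (PySem.List.enumerate arr 0).foldl (fun max_len p => max max_len (d.getD p.2 0 - p.1)) 0

-- ===== PORT B =====
def solution_alt (arr : List Int) : Int :=
  ((PySem.List.enumerate arr 0).foldl
    (fun (st : PySem.Dict Int Int × Int) p =>
      if st.1.contains p.2 then (st.1, max st.2 (p.1 - st.1.getD p.2 0))
      else (st.1.insert p.2 p.1, st.2))
    (PySem.Dict.empty, 0)).2

-- ===== PRECONDITION & SPEC =====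
def Spec_solution (arr : List Int) (out : Int) : Prop := out = solution_alt arr
instance (arr : List Int) (out : Int) : Decidable (Spec_solution arr out) := by unfold Spec_solution; infer_instance

-- ===== CLAIM (what is proved, stated in full; the proofs are below) =====
def Claim_equal_solution : Prop := ∀ (arr : List Int), Dom_solution arr → Spec_solution arr (solution arr)

-- ===== LEMMAS AND PROOFS =====

-- index of the first (resp. last) occurrence of value v in an enumerated list
def firstF (l : List (Int × Int)) (v : Int) : Option Int :=
  (l.find? (fun q => q.2 == v)).map (·.1)

def lastF (l : List (Int × Int)) (v : Int) : Option Int :=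
  firstF l.reverse v

lemma firstF_append (l₁ l₂ : List (Int × Int)) (v : Int) :
    firstF (l₁ ++ l₂) v = (firstF l₁ v).or (firstF l₂ v) := by
  simp only [firstF, List.find?_append]
  cases l₁.find? (fun q => q.2 == v) <;> simp [Option.or]

lemma firstF_cons (p : Int × Int) (l : List (Int × Int)) (v : Int) :
    firstF (p :: l) v = if p.2 = v then some p.1 else firstF l v := by
  simp only [firstF, List.find?_cons]
  by_cases h : p.2 = v
  · simp [h]
  · rw [show (p.2 == v) = false from beq_eq_false_iff_ne.mpr h, if_neg h]

lemma firstF_singleton (p : Int × Int) (v : Int) :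
    firstF [p] v = if p.2 = v then some p.1 else none := by
  rw [firstF_cons]; simp [firstF]

-- A's dict lookup is the last occurrence
lemma lastDict_get? (l : List (Int × Int)) (d : PySem.Dict Int Int) (v : Int) :
    (l.foldl (fun d p => d.insert p.2 p.1) d).get? v =
      match lastF l v with
      | some i => some i
      | none => d.get? v := by
  induction l generalizing d with
  | nil => simp [lastF, firstF]
  | cons p l ih =>
    simp only [List.foldl_cons]
    rw [ih]
    have hlast : lastF (p :: l) v = (lastF l v).or (if p.2 = v then some p.1 else none) := by
      simp only [lastF, List.reverse_cons, firstF_append, firstF_singleton]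
    rw [hlast]
    rcases lastF l v with _ | g
    · simp only [Option.none_or]
      by_cases h : p.2 = v
      · subst h
        rw [if_pos rfl, PySem.Dict.get?_insert]
        simp
      · rw [if_neg h, PySem.Dict.get?_insert, if_neg (fun hh : v = p.2 => h hh.symm)]
    · simp [Option.some_or]

-- foldl max from a nonnegative seed splits off the seed
lemma foldl_max_shift (xs : List Int) : ∀ (m : Int), 0 ≤ m →
    xs.foldl max m = max m (xs.foldl max 0) := by
  induction xs with
  | nil => intro m hm; simpa using by omega
  | cons x xs ih =>
    intro m hm
    simp only [List.foldl_cons]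
    rw [ih (max m x) (by omega), ih (max 0 x) (by omega)]
    omega

lemma foldl_max_nonneg (xs : List Int) : 0 ≤ xs.foldl max 0 := by
  induction xs with
  | nil => simp
  | cons x xs ih =>
    simp only [List.foldl_cons]
    rw [foldl_max_shift xs (max 0 x) (by omega)]
    omega

lemma le_foldl_max_of_mem (xs : List Int) (x : Int) (hx : x ∈ xs) : x ≤ xs.foldl max 0 := by
  induction xs with
  | nil => cases hx
  | cons y ys ih =>
    simp only [List.foldl_cons]
    rw [foldl_max_shift ys (max 0 y) (by omega)]
    rcases List.mem_cons.mp hx with h | h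
    · omega
    · have := ih h; omega

lemma foldl_max_le (xs : List Int) (c : Int) (h0 : 0 ≤ c) (h : ∀ x ∈ xs, x ≤ c) :
    xs.foldl max 0 ≤ c := by
  induction xs with
  | nil => simpa
  | cons y ys ih =>
    simp only [List.foldl_cons]
    rw [foldl_max_shift ys (max 0 y) (by omega)]
    have hy := h y (by simp)
    have := ih (fun x hx => h x (by simp [hx]))
    omega

-- find? on a Pairwise-ordered list returns a minimal matching element
lemma find?_min_rel {α : Type} (p : α → Bool) (r : α → α → Prop) (hrefl : ∀ a, r a a)
    (l : List α) (hp : l.Pairwise r) (a : α) (ha : a ∈ l) (hpa : p a = true) :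
    ∃ b, l.find? p = some b ∧ p b = true ∧ b ∈ l ∧ r b a := by
  induction l with
  | nil => cases ha
  | cons x xs ih =>
    rcases List.pairwise_cons.mp hp with ⟨hx, hxs⟩
    by_cases hpx : p x = true
    · refine ⟨x, by simp [hpx], hpx, by simp, ?_⟩
      rcases List.mem_cons.mp ha with h | h
      · subst h; exact hrefl a
      · exact hx a h
    · have hax : a ≠ x := fun h => hpx (h ▸ hpa)
      have ha' : a ∈ xs := by rcases List.mem_cons.mp ha with h | h; exact absurd h hax; exact h
      rcases ih hxs ha' with ⟨b, hb1, hb2, hb3, hb4⟩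
      exact ⟨b, by simp [hpx, hb1], hb2, by simp [hb3], hb4⟩

-- for (i,v) in an enumerated list: the first occurrence of v exists, is ≤ i, and is a member
lemma firstF_min (arr : List Int) (i v : Int)
    (h : (i, v) ∈ PySem.List.enumerate arr 0) :
    ∃ f, firstF (PySem.List.enumerate arr 0) v = some f ∧ f ≤ i ∧
      (f, v) ∈ PySem.List.enumerate arr 0 := by
  have hp : (PySem.List.enumerate arr 0).Pairwise (fun a b : Int × Int => a.1 ≤ b.1) :=
    (PySem.List.pairwise_lt_enumerate arr 0).imp (fun h => le_of_lt h)
  rcases find?_min_rel (fun q => q.2 == v) _ (fun a => le_refl a.1)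
      _ hp (i, v) h (by simp) with ⟨b, hb1, hb2, hb3, hb4⟩
  have hbv : b.2 = v := by simpa using hb2
  exact ⟨b.1, by simp [firstF, hb1], hb4, by rwa [show (b.1, v) = b by rw [← hbv]]⟩

-- for (i,v) in an enumerated list: the last occurrence of v exists, is ≥ i, and is a member
lemma lastF_max (arr : List Int) (i v : Int)
    (h : (i, v) ∈ PySem.List.enumerate arr 0) :
    ∃ g, lastF (PySem.List.enumerate arr 0) v = some g ∧ i ≤ g ∧
      (g, v) ∈ PySem.List.enumerate arr 0 := by
  have hp : (PySem.List.enumerate arr 0).reverse.Pairwise (fun a b : Int × Int => b.1 ≤ a.1) := by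
    rw [List.pairwise_reverse]
    exact (PySem.List.pairwise_lt_enumerate arr 0).imp (fun h => le_of_lt h)
  rcases find?_min_rel (fun q => q.2 == v) _ (fun a => le_refl a.1)
      _ hp (i, v) (by simpa using h) (by simp) with ⟨b, hb1, hb2, hb3, hb4⟩
  have hbv : b.2 = v := by simpa using hb2
  exact ⟨b.1, by simp [lastF, firstF, hb1], hb4,
    by rw [show (b.1, v) = b by rw [← hbv]]; exact List.mem_reverse.mp hb3⟩

-- B's loop, run from a dict recording the first occurrences of the prefix `pre`
lemma B_loop (full : List (Int × Int)) :
    ∀ (l pre : List (Int × Int)) (d : PySem.Dict Int Int) (m : Int),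
    pre ++ l = full →
    (∀ v, d.get? v = firstF pre v) →
    0 ≤ m →
    (l.foldl (fun (st : PySem.Dict Int Int × Int) p =>
        if st.1.contains p.2 then (st.1, max st.2 (p.1 - st.1.getD p.2 0))
        else (st.1.insert p.2 p.1, st.2)) (d, m)).2
      = max m ((l.map (fun q => q.1 - (firstF full q.2).getD 0)).foldl max 0) := by
  intro l
  induction l with
  | nil => intro pre d m _ _ hm; simpa using by omega
  | cons p l ih =>
    intro pre d m hfull hd hm
    have hpre' : (pre ++ [p]) ++ l = full := by simpa using hfull
    simp only [List.foldl_cons, List.map_cons]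
    rw [foldl_max_shift _ (max 0 (p.1 - (firstF full p.2).getD 0)) (by omega)]
    rcases hg : d.get? p.2 with _ | f
    · -- p.2 not yet seen: insert; its own term is p.1 - p.1 = 0
      have hpre0 : firstF pre p.2 = none := by rw [← hd p.2, hg]
      have hc : d.contains p.2 = false := by
        rw [PySem.Dict.contains_eq_isSome_get?, hg]; rfl
      rw [hc, if_neg (by simp)]
      have hd' : ∀ v, (d.insert p.2 p.1).get? v = firstF (pre ++ [p]) v := by
        intro v
        rw [PySem.Dict.get?_insert, firstF_append, firstF_singleton]
        by_cases hv : v = p.2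
        · subst hv
          rw [if_pos rfl, if_pos rfl, hpre0, Option.none_or]
        · rw [if_neg hv, if_neg (fun hh : p.2 = v => hv hh.symm), hd v, Option.or_none]
      rw [ih (pre ++ [p]) (d.insert p.2 p.1) m hpre' hd' hm]
      have hfirst : firstF full p.2 = some p.1 := by
        rw [← hfull, ← List.singleton_append, ← List.append_assoc,
          firstF_append, firstF_append, firstF_singleton, hpre0]
        simp
      rw [hfirst]
      simp only [Option.getD_some, sub_self]
      omega
    · -- p.2 was seen before, first at index f
      have hpre0 : firstF pre p.2 = some f := by rw [← hd p.2, hg]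
      have hc : d.contains p.2 = true := by
        rw [PySem.Dict.contains_eq_isSome_get?, hg]; rfl
      have hgd : d.getD p.2 0 = f := by
        rw [PySem.Dict.getD_eq_get?_getD, hg]; rfl
      rw [hc, if_pos rfl, hgd]
      have hd' : ∀ v, d.get? v = firstF (pre ++ [p]) v := by
        intro v
        rw [firstF_append, firstF_singleton, hd v]
        by_cases hv : v = p.2
        · subst hv; rw [hpre0]; simp
        · rw [if_neg (fun hh : p.2 = v => hv hh.symm)]
          simp [Option.or_none]
      rw [ih (pre ++ [p]) d (max m (p.1 - f)) hpre' hd' (by omega)]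
      have hfirst : firstF full p.2 = some f := by
        rw [← hfull, ← List.singleton_append, ← List.append_assoc,
          firstF_append, firstF_append, firstF_singleton, hpre0]
        simp [Option.some_or]
      rw [hfirst]
      simp only [Option.getD_some]
      omega

-- A's value as a foldl max over explicit last-occurrence terms
lemma solution_eq (arr : List Int) :
    solution arr =
      ((PySem.List.enumerate arr 0).map
        (fun q => (lastF (PySem.List.enumerate arr 0) q.2).getD 0 - q.1)).foldl max 0 := by
  simp only [solution]
  rw [List.foldl_map]
  have : (fun (a : Int) (q : Int × Int) =>
      max a (((PySem.List.enumerate arr 0).foldl (fun d p => d.insert p.2 p.1)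
        PySem.Dict.empty).getD q.2 0 - q.1))
      = (fun (a : Int) (q : Int × Int) =>
      max a ((lastF (PySem.List.enumerate arr 0) q.2).getD 0 - q.1)) := by
    funext a q
    rw [PySem.Dict.getD_eq_get?_getD, lastDict_get?]
    rcases lastF (PySem.List.enumerate arr 0) q.2 with _ | g
    · simp [PySem.Dict.get?_empty]
    · simp
  rw [this]

-- B's value as a foldl max over explicit first-occurrence terms
lemma solution_alt_eq (arr : List Int) :
    solution_alt arr =
      max 0 (((PySem.List.enumerate arr 0).map
        (fun q => q.1 - (firstF (PySem.List.enumerate arr 0) q.2).getD 0)).foldl max 0) := by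
  unfold solution_alt
  rw [B_loop (PySem.List.enumerate arr 0) (PySem.List.enumerate arr 0) [] PySem.Dict.empty 0
    (by simp) (fun v => by simp [firstF, PySem.Dict.get?_empty]) (le_refl 0)]

-- ===== VERDICT (by name: the statement is the Claim_ definition above) =====
theorem solution_spec : Claim_equal_solution := by
  unfold Claim_equal_solution
  intro arr _
  unfold Spec_solution
  rw [solution_eq, solution_alt_eq]
  have hA0 := foldl_max_nonneg ((PySem.List.enumerate arr 0).map
    (fun q => (lastF (PySem.List.enumerate arr 0) q.2).getD 0 - q.1))
  have hB0 := foldl_max_nonneg ((PySem.List.enumerate arr 0).map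
    (fun q => q.1 - (firstF (PySem.List.enumerate arr 0) q.2).getD 0))
  have hAB : ((PySem.List.enumerate arr 0).map
        (fun q => (lastF (PySem.List.enumerate arr 0) q.2).getD 0 - q.1)).foldl max 0 ≤
      ((PySem.List.enumerate arr 0).map
        (fun q => q.1 - (firstF (PySem.List.enumerate arr 0) q.2).getD 0)).foldl max 0 := by
    apply foldl_max_le _ _ hB0
    intro x hx
    rcases List.mem_map.mp hx with ⟨q, hq, rfl⟩
    rcases firstF_min arr q.1 q.2 (by simpa using hq) with ⟨f, hf1, hf2, hf3⟩
    rcases lastF_max arr q.1 q.2 (by simpa using hq) with ⟨g, hg1, hg2, hg3⟩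
    have hmem : (g - f : Int) ∈ (PySem.List.enumerate arr 0).map
        (fun q => q.1 - (firstF (PySem.List.enumerate arr 0) q.2).getD 0) :=
      List.mem_map.mpr ⟨(g, q.2), hg3, by rw [hf1]; rfl⟩
    have hle := le_foldl_max_of_mem _ _ hmem
    rw [hg1]
    simp only [Option.getD_some]
    omega
  have hBA : ((PySem.List.enumerate arr 0).map
        (fun q => q.1 - (firstF (PySem.List.enumerate arr 0) q.2).getD 0)).foldl max 0 ≤
      ((PySem.List.enumerate arr 0).map
        (fun q => (lastF (PySem.List.enumerate arr 0) q.2).getD 0 - q.1)).foldl max 0 := by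
    apply foldl_max_le _ _ hA0
    intro x hx
    rcases List.mem_map.mp hx with ⟨q, hq, rfl⟩
    rcases firstF_min arr q.1 q.2 (by simpa using hq) with ⟨f, hf1, hf2, hf3⟩
    rcases lastF_max arr q.1 q.2 (by simpa using hq) with ⟨g, hg1, hg2, hg3⟩
    have hmem : ((lastF (PySem.List.enumerate arr 0) q.2).getD 0 - f : Int) ∈
        (PySem.List.enumerate arr 0).map
        (fun q => (lastF (PySem.List.enumerate arr 0) q.2).getD 0 - q.1) :=
      List.mem_map.mpr ⟨(f, q.2), hf3, rfl⟩
    have hle := le_foldl_max_of_mem _ _ hmem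
    rw [hf1]
    rw [hg1] at hle
    simp only [Option.getD_some] at hle ⊢
    omega
  omega
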